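-- pv_equiv track=rewrite | github.com/jessicapilling/neater_xrism | utils.py | gen_pix_sel_str
-- ===== SOURCE A (Python) =====
-- def gen_pix_sel_str(include_pix: list[int] = None, exclude_pix: list[int] = None,
--                     separator: str = ':') -> str:
--     """
--     Lots of product generation functions take an input where you need to provide the pixel selection
--     so this function takes the pixels you want to exclude/include and converts them into a string
--     that is readable by these product generation functions.
--
--     Parameters
--     ----------
--     include_pix : list[int]
--         pixels to include in analysis
--     exclude_pix : list[int]
--         pixels to EXclude in analysis >:(
--     separator : str
--         the character to separate the ranges of pixels with in the return. (some functions use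
--         different ones)
--
--     Returns
--     -------
--     rtype : str
--         the formatted string, based on given pixel selection
--     """
--     # Default to full range if include_pix is None
--     if include_pix is None:
--         include_pix = set(range(36))
--     else:
--         include_pix = set(include_pix)
--
--     # Default to an empty set if exclude_pix is None
--     exclude_pix = set(exclude_pix) if exclude_pix is not None else set()
--
--     # Get valid pixels (0 to 35) that are included but not excluded
--     valid_pixels = sorted([p for p in range(36) if p in include_pix and p not in exclude_pix])
--
--     # If no pixels are left, return an empty string
--     if not valid_pixels:
--         raise ValueError("The include and exclude pixels argument have been set so there are no "
--                          "pixels left!")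
--
--     # Find contiguous ranges
--     ranges = []
--     start = valid_pixels[0]
--
--     for i in range(1, len(valid_pixels)):
--         if valid_pixels[i] != valid_pixels[i - 1] + 1:
--             # End previous range
--             end = valid_pixels[i - 1]
--             ranges.append(f"{start}{separator}{end}" if start != end else f"{start}")
--             # Start new range
--             start = valid_pixels[i]
--
--     # Append final range
--     end = valid_pixels[-1]
--     ranges.append(f"{start}{separator}{end}" if start != end else f"{start}")
--
--     return ", ".join(ranges)
-- ===== SOURCE B (Python) =====
-- def gen_pix_sel_str(include_pix: list[int] = None, exclude_pix: list[int] = None,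
--                     separator: str = ':') -> str:
--     """Boundary-point formulation: a pixel starts a range iff its predecessor is
--     not selected and ends one iff its successor is not selected; zip the two."""
--     include_pix = set(range(36)) if include_pix is None else set(include_pix)
--     exclude_pix = set(exclude_pix) if exclude_pix is not None else set()
--
--     valid = {p for p in range(36) if p in include_pix and p not in exclude_pix}
--
--     if not valid:
--         raise ValueError("The include and exclude pixels argument have been set so there are no "
--                          "pixels left!")
--
--     starts = sorted(p for p in valid if p - 1 not in valid)
--     ends = sorted(p for p in valid if p + 1 not in valid)
--
--     return ", ".join(f"{s}" if s == e else f"{s}{separator}{e}"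
--                      for s, e in zip(starts, ends))
-- ===== Notes on version B (the rewrite author's own statement) =====
-- stated objective: alternative
-- what changed: Instead of scanning sorted pixels by index and comparing each element with its predecessor while carrying a pending range start, B extracts the set of range starts (p with p-1 unselected) and range ends (p with p+1 unselected) by membership tests on the valid set and zips them; formatting happens once over the zipped pairs.
import Mathlib
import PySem

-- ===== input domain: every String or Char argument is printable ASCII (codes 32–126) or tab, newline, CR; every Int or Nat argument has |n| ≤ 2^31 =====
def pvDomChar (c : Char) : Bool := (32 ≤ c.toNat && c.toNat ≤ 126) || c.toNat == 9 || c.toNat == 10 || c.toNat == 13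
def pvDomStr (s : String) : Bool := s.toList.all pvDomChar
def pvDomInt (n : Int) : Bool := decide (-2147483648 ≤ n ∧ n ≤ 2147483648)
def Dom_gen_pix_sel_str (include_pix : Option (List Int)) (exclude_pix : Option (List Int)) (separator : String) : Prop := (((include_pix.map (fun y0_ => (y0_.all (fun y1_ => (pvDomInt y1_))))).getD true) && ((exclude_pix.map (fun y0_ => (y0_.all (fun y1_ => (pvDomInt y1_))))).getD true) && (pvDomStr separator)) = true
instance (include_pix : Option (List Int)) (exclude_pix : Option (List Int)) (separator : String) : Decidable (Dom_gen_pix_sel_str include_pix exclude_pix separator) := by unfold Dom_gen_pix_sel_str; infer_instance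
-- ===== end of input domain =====

-- B replaces A's index scan over the sorted pixel list (comparing each element with
-- its predecessor while carrying a pending range start) by extracting the range
-- starts and range ends directly via membership tests on the valid set and zipping
-- them: an alternative decomposition of the same cost.

-- ===== PORT A =====
def gen_pix_sel_str (include_pix : Option (List Int)) (exclude_pix : Option (List Int)) (separator : String) : String :=
  let inc : PySem.Set Int :=
    match include_pix with
    | none => PySem.Set.ofList (PySem.List.pyRange 0 36 1)
    | some l => PySem.Set.ofList l
  let exc : PySem.Set Int :=
    match exclude_pix with
    | some l => PySem.Set.ofList l
    | none => PySem.Set.empty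
  let valid_pixels : List Int :=
    PySem.List.sorted ((PySem.List.pyRange 0 36 1).filter
      (fun p => PySem.Set.contains inc p && !PySem.Set.contains exc p)) (fun x => x) false
  if valid_pixels = [] then ""  -- Python raises ValueError here; excluded by Pre_
  else
    let res : List String × Int :=
      (PySem.List.pyRange 1 (valid_pixels.length : Int) 1).foldl
        (fun (st : List String × Int) i =>
          let vi := PySem.List.pyGetD valid_pixels i 0
          let vp := PySem.List.pyGetD valid_pixels (i - 1) 0
          if vi ≠ vp + 1 then
            (st.1 ++ [if st.2 ≠ vp then PySem.Int.toStr st.2 ++ separator ++ PySem.Int.toStr vp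
                      else PySem.Int.toStr st.2], vi)
          else st)
        ([], PySem.List.pyGetD valid_pixels 0 0)
    let lastv := PySem.List.pyGetD valid_pixels (-1) 0
    PySem.Str.join ", "
      (res.1 ++ [if res.2 ≠ lastv then PySem.Int.toStr res.2 ++ separator ++ PySem.Int.toStr lastv
                 else PySem.Int.toStr res.2])

-- ===== PORT B =====
def gen_pix_sel_str_alt (include_pix : Option (List Int)) (exclude_pix : Option (List Int)) (separator : String) : String :=
  let inc : PySem.Set Int :=
    match include_pix with
    | none => PySem.Set.ofList (PySem.List.pyRange 0 36 1)
    | some l => PySem.Set.ofList l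
  let exc : PySem.Set Int :=
    match exclude_pix with
    | some l => PySem.Set.ofList l
    | none => PySem.Set.empty
  let valid : PySem.Set Int :=
    PySem.Set.ofList ((PySem.List.pyRange 0 36 1).filter
      (fun p => PySem.Set.contains inc p && !PySem.Set.contains exc p))
  if valid = [] then ""  -- Python raises ValueError here; excluded by Pre_
  else
    let starts : List Int :=
      PySem.List.sorted (valid.filter (fun p => !PySem.Set.contains valid (p - 1))) (fun x => x) false
    let ends : List Int :=
      PySem.List.sorted (valid.filter (fun p => !PySem.Set.contains valid (p + 1))) (fun x => x) false
    PySem.Str.join ", "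
      ((starts.zip ends).map (fun se =>
        if se.1 = se.2 then PySem.Int.toStr se.1
        else PySem.Int.toStr se.1 ++ separator ++ PySem.Int.toStr se.2))

-- ===== PRECONDITION & SPEC =====
-- Pre_ excludes exactly the inputs on which the Python raises ValueError:
-- no pixel in 0..35 is both included and not excluded.
def Pre_gen_pix_sel_str (include_pix : Option (List Int)) (exclude_pix : Option (List Int)) (separator : String) : Prop :=
  ((PySem.List.pyRange 0 36 1).any (fun p =>
    (match include_pix with | none => true | some l => decide (p ∈ l)) &&
    !(match exclude_pix with | none => false | some l => decide (p ∈ l)))) = true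

instance (include_pix : Option (List Int)) (exclude_pix : Option (List Int)) (separator : String) : Decidable (Pre_gen_pix_sel_str include_pix exclude_pix separator) := by unfold Pre_gen_pix_sel_str; infer_instance

def pvWitness_gen_pix_sel_str : Option (List Int) × Option (List Int) × String :=
  (some [1, 2, 3, 5, 9], some [2], ":")

def Spec_gen_pix_sel_str (include_pix : Option (List Int)) (exclude_pix : Option (List Int)) (separator : String) (out : String) : Prop := out = gen_pix_sel_str_alt include_pix exclude_pix separator
instance (include_pix : Option (List Int)) (exclude_pix : Option (List Int)) (separator : String) (out : String) : Decidable (Spec_gen_pix_sel_str include_pix exclude_pix separator out) := by unfold Spec_gen_pix_sel_str; infer_instance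

-- ===== CLAIM (what is proved, stated in full; the proofs are below) =====
def Claim_equal_gen_pix_sel_str : Prop := ∀ (include_pix : Option (List Int)) (exclude_pix : Option (List Int)) (separator : String), Dom_gen_pix_sel_str include_pix exclude_pix separator → Pre_gen_pix_sel_str include_pix exclude_pix separator → Spec_gen_pix_sel_str include_pix exclude_pix separator (gen_pix_sel_str include_pix exclude_pix separator)

-- ===== LEMMAS AND PROOFS =====

/-- Canonical maximal runs of a strictly increasing integer list, built back to front. -/
def pvRuns : List Int → List (Int × Int)
  | [] => []
  | x :: xs =>
    match pvRuns xs with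
    | [] => [(x, x)]
    | (s, e) :: r => if s = x + 1 then (x, e) :: r else (x, x) :: (s, e) :: r

/-- B's formatting of a run. -/
def pvFmt (sep : String) (se : Int × Int) : String :=
  if se.1 = se.2 then PySem.Int.toStr se.1
  else PySem.Int.toStr se.1 ++ sep ++ PySem.Int.toStr se.2

/-- A's formatting of a pending range (condition written as A writes it). -/
def pvFmtA (sep : String) (s e : Int) : String :=
  if s ≠ e then PySem.Int.toStr s ++ sep ++ PySem.Int.toStr e else PySem.Int.toStr s

theorem pvFmtA_eq_pvFmt (sep : String) (s e : Int) : pvFmtA sep s e = pvFmt sep (s, e) := by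
  unfold pvFmtA pvFmt
  by_cases h : s = e <;> simp [h]

/-- A's break-scan, recast structurally: pending run started at `s`, previous value `prev`. -/
def pvGoA (sep : String) (s prev : Int) : List Int → List String
  | [] => [pvFmtA sep s prev]
  | y :: ys => if y ≠ prev + 1 then pvFmtA sep s prev :: pvGoA sep y y ys else pvGoA sep s y ys

theorem pvRuns_cons (x : Int) (xs : List Int) :
    pvRuns (x :: xs) = match pvRuns xs with
      | [] => [(x, x)]
      | (s, e) :: r => if s = x + 1 then (x, e) :: r else (x, x) :: (s, e) :: r := rfl

theorem pvRuns_head (y : Int) (ys : List Int) :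
    ∃ e r, pvRuns (y :: ys) = (y, e) :: r := by
  unfold pvRuns
  match h : pvRuns ys with
  | [] => exact ⟨y, [], rfl⟩
  | (s, e) :: r =>
    by_cases hs : s = y + 1
    · exact ⟨e, r, by simp [hs]⟩
    · exact ⟨y, (s, e) :: r, by simp [hs]⟩

theorem pvGoA_runs (sep : String) : ∀ (xs : List Int) (s prev e : Int) (r : List (Int × Int)),
    pvRuns (prev :: xs) = (prev, e) :: r →
    pvGoA sep s prev xs = pvFmtA sep s e :: r.map (fun q => pvFmtA sep q.1 q.2) := by
  intro xs
  induction xs with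
  | nil =>
    intro s prev e r h
    simp only [pvRuns] at h
    cases h
    simp [pvGoA]
  | cons y ys ih =>
    intro s prev e r h
    obtain ⟨e', r', hy⟩ := pvRuns_head y ys
    by_cases hadj : y = prev + 1
    · have hrp : pvRuns (prev :: y :: ys) = (prev, e') :: r' := by
        have h0 := pvRuns_cons prev (y :: ys)
        rw [hy] at h0
        simpa [hadj] using h0
      rw [hrp] at h
      cases h
      simp only [pvGoA]
      rw [if_neg (not_not.mpr hadj)]
      exact ih s y e r hy
    · have hrp : pvRuns (prev :: y :: ys) = (prev, prev) :: (y, e') :: r' := by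
        have h0 := pvRuns_cons prev (y :: ys)
        rw [hy] at h0
        simpa [hadj] using h0
      rw [hrp] at h
      cases h
      simp only [pvGoA]
      rw [if_pos hadj]
      rw [ih y y e' r' hy]
      simp

/-- Bridge: A's index fold over range(1, len) with element gets is the fold over adjacent pairs. -/
theorem pvIdxFold {σ : Type} (f : σ → Int → Int → σ) (L : List Int) :
    ∀ (n a : Nat), L.length ≤ a + n →
    ∀ st, (PySem.List.pyRange ((a : Int) + 1) (L.length : Int) 1).foldl
      (fun st i => f st (PySem.List.pyGetD L (i - 1) 0) (PySem.List.pyGetD L i 0)) st =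
    ((L.drop a).zip (L.drop (a + 1))).foldl (fun st p => f st p.1 p.2) st := by
  intro n
  induction n with
  | zero =>
    intro a ha st
    have h1 : (L.length : Int) ≤ (a : Int) + 1 := by exact_mod_cast Nat.le_succ_of_le ha
    rw [PySem.List.pyRange_one_eq_nil h1]
    have hd : L.drop (a + 1) = [] := List.drop_eq_nil_of_le (Nat.le_succ_of_le ha)
    simp [hd]
  | succ m ih =>
    intro a ha st
    by_cases hlt : (a : Int) + 1 < (L.length : Int)
    · have halt : a + 1 < L.length := by exact_mod_cast hlt
      rw [PySem.List.pyRange_one_cons hlt]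
      simp only [List.foldl_cons]
      have hget1 : PySem.List.pyGetD L ((a : Int) + 1 - 1) 0 = L[a] := by
        have he : (a : Int) + 1 - 1 = ((a : Nat) : Int) := by ring
        rw [he, PySem.List.pyGetD_natCast]
        simp [List.getD_eq_getElem?_getD, List.getElem?_eq_getElem (Nat.lt_of_succ_lt halt)]
      have hget2 : PySem.List.pyGetD L ((a : Int) + 1) 0 = L[a + 1] := by
        have he : (a : Int) + 1 = ((a + 1 : Nat) : Int) := by push_cast; ring
        rw [he, PySem.List.pyGetD_natCast]
        simp [List.getD_eq_getElem?_getD, List.getElem?_eq_getElem halt]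
      have hcast : (a : Int) + 1 + 1 = ((a + 1 : Nat) : Int) + 1 := by push_cast; ring
      rw [hget1, hget2, hcast]
      rw [ih (a + 1) (by omega)]
      have hda : L.drop a = L[a] :: L.drop (a + 1) :=
        List.drop_eq_getElem_cons (Nat.lt_of_succ_lt halt)
      have hda1 : L.drop (a + 1) = L[a + 1] :: L.drop (a + 1 + 1) :=
        List.drop_eq_getElem_cons halt
      rw [hda]
      nth_rewrite 3 [hda1]
      rw [List.zip_cons_cons, List.foldl_cons]
    · have h1 : (L.length : Int) ≤ (a : Int) + 1 := by omega
      rw [PySem.List.pyRange_one_eq_nil h1]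
      have hle : L.length ≤ a + 1 := by exact_mod_cast h1
      have hd : L.drop (a + 1) = [] := List.drop_eq_nil_of_le hle
      simp [hd]

/-- A's pair fold plus final append equals the structural scan pvGoA. -/
theorem pvZipGo (sep : String) : ∀ (xs : List Int) (prev s : Int) (acc : List String),
    (((prev :: xs).zip xs).foldl
        (fun (st : List String × Int) p =>
          if p.2 ≠ p.1 + 1 then (st.1 ++ [pvFmtA sep st.2 p.1], p.2) else st) (acc, s)).1 ++
      [pvFmtA sep
        (((prev :: xs).zip xs).foldl
          (fun (st : List String × Int) p =>
            if p.2 ≠ p.1 + 1 then (st.1 ++ [pvFmtA sep st.2 p.1], p.2) else st) (acc, s)).2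
        ((prev :: xs).getLast (by simp))]
    = acc ++ pvGoA sep s prev xs := by
  intro xs
  induction xs with
  | nil => intro prev s acc; simp [pvGoA]
  | cons y ys ih =>
    intro prev s acc
    have hzip : (prev :: y :: ys).zip (y :: ys) = (prev, y) :: (y :: ys).zip ys := by simp
    have hlast : (prev :: y :: ys).getLast (by simp) = (y :: ys).getLast (by simp) :=
      List.getLast_cons (by simp)
    simp only [hzip, List.foldl_cons, hlast]
    by_cases hadj : y = prev + 1
    · rw [if_neg (not_not.mpr hadj)]
      rw [ih y s acc]
      have hg : pvGoA sep s prev (y :: ys) = pvGoA sep s y ys := by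
        simp only [pvGoA]; rw [if_neg (not_not.mpr hadj)]
      rw [hg]
    · rw [if_pos hadj]
      rw [ih y y (acc ++ [pvFmtA sep s prev])]
      have hg : pvGoA sep s prev (y :: ys) = pvFmtA sep s prev :: pvGoA sep y y ys := by
        simp only [pvGoA]; rw [if_pos hadj]
      rw [hg]
      simp

/-- Run starts of a strictly increasing list are its members without a predecessor. -/
theorem pvRuns_fst : ∀ (L : List Int), L.Pairwise (· < ·) →
    (pvRuns L).map Prod.fst = L.filter (fun p => !decide ((p - 1) ∈ L)) := by
  intro L
  induction L with
  | nil => intro _; simp [pvRuns]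
  | cons x xs ih =>
    intro hp
    have hxlt : ∀ y ∈ xs, x < y := fun y hy => (List.pairwise_cons.mp hp).1 y hy
    have hps : xs.Pairwise (· < ·) := (List.pairwise_cons.mp hp).2
    have hx1 : ¬ (x - 1 ∈ x :: xs) := by
      simp only [List.mem_cons, not_or]
      exact ⟨by omega, fun h => by have := hxlt _ h; omega⟩
    rw [List.filter_cons_of_pos (by simpa using hx1)]
    cases xs with
    | nil => simp [pvRuns]
    | cons y ys =>
      have hylt : ∀ z ∈ ys, y < z := fun z hz => (List.pairwise_cons.mp hps).1 z hz
      obtain ⟨e', r', hy⟩ := pvRuns_head y ys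
      have ihs := ih hps
      by_cases hadj : y = x + 1
      · -- merge: y is dropped by the cons-level filter, kept by the local one
        have hrp : pvRuns (x :: y :: ys) = (x, e') :: r' := by
          have h0 := pvRuns_cons x (y :: ys)
          rw [hy] at h0
          simpa [hadj] using h0
        rw [hrp]
        -- from ih: y :: map fst r' = (y::ys).filter local
        rw [hy] at ihs
        have hyk : (y :: ys).filter (fun p => !decide ((p - 1) ∈ y :: ys)) =
            y :: ys.filter (fun p => !decide ((p - 1) ∈ y :: ys)) := by
          rw [List.filter_cons_of_pos]
          simp only [List.mem_cons, decide_eq_true_eq, Bool.not_eq_eq_eq_not, Bool.not_true,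
            decide_eq_false_iff_not, not_or]
          exact ⟨by omega, fun h => by have := hylt _ h; omega⟩
        rw [hyk] at ihs
        have htail : List.map Prod.fst r' = ys.filter (fun p => !decide ((p - 1) ∈ y :: ys)) := by
          simpa using congrArg List.tail ihs
        -- cons-level filter on (y::ys): y dropped (y-1 = x), tail conditions agree
        have hyd : (y :: ys).filter (fun p => !decide ((p - 1) ∈ x :: y :: ys)) =
            ys.filter (fun p => !decide ((p - 1) ∈ x :: y :: ys)) := by
          rw [List.filter_cons_of_neg]
          simp [hadj]
        have hcong : ys.filter (fun p => !decide ((p - 1) ∈ x :: y :: ys)) =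
            ys.filter (fun p => !decide ((p - 1) ∈ y :: ys)) := by
          apply List.filter_congr
          intro p hpm
          have hpy : y < p := hylt p hpm
          have : ¬ (p - 1 = x) := by omega
          simp [List.mem_cons, this]
        rw [hyd, hcong, ← htail]
        simp
      · -- no merge: x starts and closes its own run
        have hrp : pvRuns (x :: y :: ys) = (x, x) :: (y, e') :: r' := by
          have h0 := pvRuns_cons x (y :: ys)
          rw [hy] at h0
          simpa [hadj] using h0
        rw [hrp]
        have hcong : (y :: ys).filter (fun p => !decide ((p - 1) ∈ x :: y :: ys)) =
            (y :: ys).filter (fun p => !decide ((p - 1) ∈ y :: ys)) := by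
          apply List.filter_congr
          intro p hpm
          have hpx : x < p := hxlt p hpm
          have hppx : ¬ (p - 1 = x) := by
            rcases List.mem_cons.mp hpm with h | h
            · omega
            · have := hylt p h
              have hyx : x < y := hxlt y (by simp)
              -- y ≠ x+1 and x < y gives y ≥ x+2, so p > y ≥ x+2
              have : x + 1 < y := by omega
              omega
          simp [List.mem_cons, hppx]
        rw [hcong, ← ihs, hy]
        simp

/-- Run ends of a strictly increasing list are its members without a successor. -/
theorem pvRuns_snd : ∀ (L : List Int), L.Pairwise (· < ·) →
    (pvRuns L).map Prod.snd = L.filter (fun p => !decide ((p + 1) ∈ L)) := by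
  intro L
  induction L with
  | nil => intro _; simp [pvRuns]
  | cons x xs ih =>
    intro hp
    have hxlt : ∀ y ∈ xs, x < y := fun y hy => (List.pairwise_cons.mp hp).1 y hy
    have hps : xs.Pairwise (· < ·) := (List.pairwise_cons.mp hp).2
    cases xs with
    | nil => simp [pvRuns]
    | cons y ys =>
      have hylt : ∀ z ∈ ys, y < z := fun z hz => (List.pairwise_cons.mp hps).1 z hz
      have hyx : x < y := hxlt y (by simp)
      obtain ⟨e', r', hy⟩ := pvRuns_head y ys
      have ihs := ih hps
      have hcongtail : (y :: ys).filter (fun p => !decide ((p + 1) ∈ x :: y :: ys)) =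
          (y :: ys).filter (fun p => !decide ((p + 1) ∈ y :: ys)) := by
        apply List.filter_congr
        intro p hpm
        have hpx : x < p := hxlt p hpm
        have : ¬ (p + 1 = x) := by omega
        simp [List.mem_cons, this]
      by_cases hadj : y = x + 1
      · -- merge: x has a successor, dropped; runs merge
        have hrp : pvRuns (x :: y :: ys) = (x, e') :: r' := by
          have h0 := pvRuns_cons x (y :: ys)
          rw [hy] at h0
          simpa [hadj] using h0
        rw [hrp]
        have hxd : (x :: y :: ys).filter (fun p => !decide ((p + 1) ∈ x :: y :: ys)) =
            (y :: ys).filter (fun p => !decide ((p + 1) ∈ x :: y :: ys)) := by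
          rw [List.filter_cons_of_neg]
          simp [List.mem_cons, hadj]
        rw [hxd, hcongtail, ← ihs, hy]
        simp
      · -- no merge: x has no successor in the list
        have hrp : pvRuns (x :: y :: ys) = (x, x) :: (y, e') :: r' := by
          have h0 := pvRuns_cons x (y :: ys)
          rw [hy] at h0
          simpa [hadj] using h0
        rw [hrp]
        have hxk : (x :: y :: ys).filter (fun p => !decide ((p + 1) ∈ x :: y :: ys)) =
            x :: (y :: ys).filter (fun p => !decide ((p + 1) ∈ x :: y :: ys)) := by
          rw [List.filter_cons_of_pos]
          have h1 : ¬ (x + 1 = x) := by omega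
          have h2 : ¬ (x + 1 = y) := by omega
          have h3 : ¬ (x + 1 ∈ ys) := fun h => by have := hylt _ h; omega
          simp [List.mem_cons, h1, h2, h3]
        rw [hxk, hcongtail, ← ihs, hy]
        simp

theorem pvGetLast (L : List Int) (h : L ≠ []) : PySem.List.pyGetD L (-1) 0 = L.getLast h := by
  unfold PySem.List.pyGetD PySem.List.pyGet? PySem.List.pyIdx?
  have hlen : 0 < L.length := List.length_pos_iff.mpr h
  rw [if_neg (by norm_num), if_pos (by exact_mod_cast by omega : -(L.length : Int) ≤ -1)]
  have h2 : (-(-1 : Int)).toNat = 1 := by norm_num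
  rw [h2]
  rw [List.getLast_eq_getElem]
  simp [List.getElem?_eq_getElem (Nat.sub_lt hlen one_pos)]

theorem pvContains_ofList (l : List Int) (p : Int) :
    PySem.Set.contains (PySem.Set.ofList l) p = decide (p ∈ l) := by
  by_cases h : p ∈ l <;> simp [PySem.Set.mem_ofList, h]

theorem pvContains_empty (p : Int) : PySem.Set.contains PySem.Set.empty p = false := by
  simp [PySem.Set.empty]

/-- A's else-branch (with the valid list already simplified to `L`) equals B's. -/
theorem pvCore (sep : String) (L : List Int) (hpw : L.Pairwise (· < ·)) (hne : L ≠ []) :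
    PySem.Str.join ", "
      (((PySem.List.pyRange 1 (L.length : Int) 1).foldl
          (fun (st : List String × Int) i =>
            if PySem.List.pyGetD L i 0 ≠ PySem.List.pyGetD L (i - 1) 0 + 1 then
              (st.1 ++ [pvFmtA sep st.2 (PySem.List.pyGetD L (i - 1) 0)], PySem.List.pyGetD L i 0)
            else st) ([], PySem.List.pyGetD L 0 0)).1
        ++ [pvFmtA sep
              ((PySem.List.pyRange 1 (L.length : Int) 1).foldl
                (fun (st : List String × Int) i =>
                  if PySem.List.pyGetD L i 0 ≠ PySem.List.pyGetD L (i - 1) 0 + 1 then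
                    (st.1 ++ [pvFmtA sep st.2 (PySem.List.pyGetD L (i - 1) 0)], PySem.List.pyGetD L i 0)
                  else st) ([], PySem.List.pyGetD L 0 0)).2
              (PySem.List.pyGetD L (-1) 0)])
    = PySem.Str.join ", "
      (((PySem.List.sorted (L.filter (fun p => !PySem.Set.contains L (p - 1))) (fun x => x) false).zip
        (PySem.List.sorted (L.filter (fun p => !PySem.Set.contains L (p + 1))) (fun x => x) false)).map
        (pvFmt sep)) := by
  obtain ⟨x, xs, rfl⟩ := List.exists_cons_of_ne_nil hne
  -- A side: index fold → adjacent-pair fold → structural scan → runs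
  have hget0 : PySem.List.pyGetD (x :: xs) 0 0 = x := by simp [pysem]
  have hgetl : PySem.List.pyGetD (x :: xs) (-1) 0 = (x :: xs).getLast (by simp) :=
    pvGetLast _ (by simp)
  have hfold :
      (PySem.List.pyRange 1 ((x :: xs).length : Int) 1).foldl
        (fun (st : List String × Int) i =>
          if PySem.List.pyGetD (x :: xs) i 0 ≠ PySem.List.pyGetD (x :: xs) (i - 1) 0 + 1 then
            (st.1 ++ [pvFmtA sep st.2 (PySem.List.pyGetD (x :: xs) (i - 1) 0)],
              PySem.List.pyGetD (x :: xs) i 0)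
          else st) ([], x)
      = ((x :: xs).zip xs).foldl
          (fun (st : List String × Int) p =>
            if p.2 ≠ p.1 + 1 then (st.1 ++ [pvFmtA sep st.2 p.1], p.2) else st) ([], x) := by
    have h := pvIdxFold
      (fun (st : List String × Int) vp vi =>
        if vi ≠ vp + 1 then (st.1 ++ [pvFmtA sep st.2 vp], vi) else st)
      (x :: xs) (x :: xs).length 0 (by omega) ([], x)
    simp only [Nat.cast_zero, zero_add, List.drop_zero, List.drop_one, List.tail_cons] at h
    exact h
  rw [hget0, hgetl, hfold]
  rw [pvZipGo sep xs x x []]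
  obtain ⟨e, r, hr⟩ := pvRuns_head x xs
  rw [pvGoA_runs sep xs x x e r hr]
  have hm : pvFmtA sep x e :: r.map (fun q => pvFmtA sep q.1 q.2)
      = (pvRuns (x :: xs)).map (fun q => pvFmtA sep q.1 q.2) := by
    rw [hr]; simp
  rw [List.nil_append, hm]
  -- B side: membership filters → run starts/ends → zip of fst/snd
  have hc1 : (fun p : Int => !PySem.Set.contains (x :: xs) (p - 1))
      = (fun p : Int => !decide ((p - 1) ∈ (x :: xs))) := by
    funext p; simp
  have hc2 : (fun p : Int => !PySem.Set.contains (x :: xs) (p + 1))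
      = (fun p : Int => !decide ((p + 1) ∈ (x :: xs))) := by
    funext p; simp
  rw [hc1, hc2]
  have hs1 : PySem.List.sorted
        ((x :: xs).filter (fun p => !decide ((p - 1) ∈ (x :: xs)))) (fun x => x) false
      = (x :: xs).filter (fun p => !decide ((p - 1) ∈ (x :: xs))) :=
    PySem.List.sorted_eq_self_of_pairwise _ (fun x => x)
      ((List.Pairwise.filter _ hpw).imp (fun h => le_of_lt h))
  have hs2 : PySem.List.sorted
        ((x :: xs).filter (fun p => !decide ((p + 1) ∈ (x :: xs)))) (fun x => x) false
      = (x :: xs).filter (fun p => !decide ((p + 1) ∈ (x :: xs))) :=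
    PySem.List.sorted_eq_self_of_pairwise _ (fun x => x)
      ((List.Pairwise.filter _ hpw).imp (fun h => le_of_lt h))
  rw [hs1, hs2, ← pvRuns_fst _ hpw, ← pvRuns_snd _ hpw]
  rw [List.zip_map']
  simp [pvFmtA_eq_pvFmt]

/-- A's whole body (inputs already reduced to the two sets) … -/
def pvAbody (inc exc : PySem.Set Int) (sep : String) : String :=
  let valid_pixels : List Int :=
    PySem.List.sorted ((PySem.List.pyRange 0 36 1).filter
      (fun p => PySem.Set.contains inc p && !PySem.Set.contains exc p)) (fun x => x) false
  if valid_pixels = [] then ""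
  else
    let res : List String × Int :=
      (PySem.List.pyRange 1 (valid_pixels.length : Int) 1).foldl
        (fun (st : List String × Int) i =>
          let vi := PySem.List.pyGetD valid_pixels i 0
          let vp := PySem.List.pyGetD valid_pixels (i - 1) 0
          if vi ≠ vp + 1 then
            (st.1 ++ [if st.2 ≠ vp then PySem.Int.toStr st.2 ++ sep ++ PySem.Int.toStr vp
                      else PySem.Int.toStr st.2], vi)
          else st)
        ([], PySem.List.pyGetD valid_pixels 0 0)
    let lastv := PySem.List.pyGetD valid_pixels (-1) 0
    PySem.Str.join ", "
      (res.1 ++ [if res.2 ≠ lastv then PySem.Int.toStr res.2 ++ sep ++ PySem.Int.toStr lastv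
                 else PySem.Int.toStr res.2])

/-- … and B's. -/
def pvBbody (inc exc : PySem.Set Int) (sep : String) : String :=
  let valid : PySem.Set Int :=
    PySem.Set.ofList ((PySem.List.pyRange 0 36 1).filter
      (fun p => PySem.Set.contains inc p && !PySem.Set.contains exc p))
  if valid = [] then ""
  else
    let starts : List Int :=
      PySem.List.sorted (valid.filter (fun p => !PySem.Set.contains valid (p - 1))) (fun x => x) false
    let ends : List Int :=
      PySem.List.sorted (valid.filter (fun p => !PySem.Set.contains valid (p + 1))) (fun x => x) false
    PySem.Str.join ", "
      ((starts.zip ends).map (fun se =>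
        if se.1 = se.2 then PySem.Int.toStr se.1
        else PySem.Int.toStr se.1 ++ sep ++ PySem.Int.toStr se.2))

theorem pvBodyEq (inc exc : PySem.Set Int) (sep : String)
    (hne : (PySem.List.pyRange 0 36 1).filter
      (fun p => PySem.Set.contains inc p && !PySem.Set.contains exc p) ≠ []) :
    pvAbody inc exc sep = pvBbody inc exc sep := by
  unfold pvAbody pvBbody
  set L : List Int := (PySem.List.pyRange 0 36 1).filter
      (fun p => PySem.Set.contains inc p && !PySem.Set.contains exc p) with hLdef
  have hpw : L.Pairwise (· < ·) :=
    List.Pairwise.filter _ (PySem.List.pairwise_lt_pyRange_one 0 36)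
  have hnd : L.Nodup := hpw.imp (fun h => ne_of_lt h)
  have hsor : PySem.List.sorted L (fun x => x) false = L :=
    PySem.List.sorted_eq_self_of_pairwise _ (fun x => x) (hpw.imp (fun h => le_of_lt h))
  have hofl : PySem.Set.ofList L = L := PySem.Set.ofList_eq_self_of_nodup _ hnd
  simp only [hsor, hofl, if_neg hne]
  exact pvCore sep L hpw hne

-- ===== VERDICT (by name: the statement is the Claim_ definition above) =====
theorem gen_pix_sel_str_spec : Claim_equal_gen_pix_sel_str := by
  intro ipx epx sep hdom hpre
  unfold Spec_gen_pix_sel_str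
  unfold Pre_gen_pix_sel_str at hpre
  rw [List.any_eq_true] at hpre
  obtain ⟨p, hpmem, hp⟩ := hpre
  cases ipx with
  | none =>
    cases epx with
    | none =>
      refine pvBodyEq (PySem.Set.ofList (PySem.List.pyRange 0 36 1)) PySem.Set.empty sep ?_
      refine List.ne_nil_of_mem (a := p) (List.mem_filter.mpr ⟨hpmem, ?_⟩)
      simp [pvContains_ofList, pvContains_empty, hpmem]
    | some le =>
      simp only [decide_eq_true_eq] at hp
      refine pvBodyEq (PySem.Set.ofList (PySem.List.pyRange 0 36 1)) (PySem.Set.ofList le) sep ?_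
      refine List.ne_nil_of_mem (a := p) (List.mem_filter.mpr ⟨hpmem, ?_⟩)
      simp only [pvContains_ofList, hpmem, decide_true, Bool.true_and]
      simpa using hp
  | some li =>
    cases epx with
    | none =>
      simp only [decide_eq_true_eq] at hp
      refine pvBodyEq (PySem.Set.ofList li) PySem.Set.empty sep ?_
      refine List.ne_nil_of_mem (a := p) (List.mem_filter.mpr ⟨hpmem, ?_⟩)
      simp only [pvContains_ofList, pvContains_empty]
      simpa using hp
    | some le =>
      refine pvBodyEq (PySem.Set.ofList li) (PySem.Set.ofList le) sep ?_
      refine List.ne_nil_of_mem (a := p) (List.mem_filter.mpr ⟨hpmem, ?_⟩)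
      simp only [pvContains_ofList]
      simpa using hp
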